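-- pv_equiv track=rewrite | github.com/daniel-reich/ubiquitous-fiesta | tjMNAEgkNvM5eyEqJ_3.py | unique_abbrev
-- ===== SOURCE A (Python) =====
-- def unique_abbrev(abbs, words):
--   for ab in abbs:
--     counter = 0
--     for word in words:
--       if word.startswith(ab):
--         counter += 1
--     if counter > 1:
--       return False
--   return True
-- ===== SOURCE B (Python) =====
-- def unique_abbrev(abbs, words):
--     cnt = {}
--     for w in words:
--         for i in range(len(w) + 1):
--             p = w[:i]
--             cnt[p] = cnt.get(p, 0) + 1
--     return all(cnt.get(ab, 0) <= 1 for ab in abbs)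
-- ===== Notes on version B (the rewrite author's own statement) =====
-- stated objective: alternative
-- what changed: Replaces A's nested scan (for each abbreviation, count over all words) by a single pass that builds one dictionary counting every prefix of every word, after which each abbreviation is answered by one O(1) lookup.
import Mathlib
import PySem

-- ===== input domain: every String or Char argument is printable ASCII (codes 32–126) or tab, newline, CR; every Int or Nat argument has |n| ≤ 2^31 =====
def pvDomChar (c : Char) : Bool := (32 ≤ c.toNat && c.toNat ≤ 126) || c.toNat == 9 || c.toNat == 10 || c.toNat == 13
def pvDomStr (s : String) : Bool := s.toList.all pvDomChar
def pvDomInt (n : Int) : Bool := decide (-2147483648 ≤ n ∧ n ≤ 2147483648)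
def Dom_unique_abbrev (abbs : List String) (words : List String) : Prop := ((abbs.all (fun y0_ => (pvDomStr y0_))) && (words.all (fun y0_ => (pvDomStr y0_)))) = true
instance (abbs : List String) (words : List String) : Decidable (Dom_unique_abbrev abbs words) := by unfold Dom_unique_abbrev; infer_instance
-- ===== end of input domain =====

-- B replaces A's nested abbs×words prefix scans by one prefix-count dictionary built
-- from the words, each abbreviation then answered by a single lookup (alternative algorithm).

-- ===== PORT A =====
-- outer 'for ab in abbs' loop of A (inner 'for word in words' loop is the foldl)
def uaLoop (words : List String) : List String → Bool
  | [] => true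
  | ab :: rest =>
    let counter : Int :=
      words.foldl (fun c word => if PySem.Str.startswith word ab then c + 1 else c) 0
    if counter > 1 then false else uaLoop words rest

def unique_abbrev (abbs : List String) (words : List String) : Bool :=
  uaLoop words abbs

-- ===== PORT B =====
def unique_abbrev_alt (abbs : List String) (words : List String) : Bool :=
  let cnt : PySem.Dict String Int :=
    words.foldl (fun d w =>
      (PySem.List.pyRange 0 (PySem.Str.len w + 1)).foldl
        (fun d i =>
          let p := PySem.Str.slice w none (some i)
          d.insert p (d.getD p 0 + 1)) d)
      PySem.Dict.empty
  abbs.all (fun ab => cnt.getD ab 0 ≤ 1)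

-- ===== PRECONDITION & SPEC =====
def Spec_unique_abbrev (abbs : List String) (words : List String) (out : Bool) : Prop := out = unique_abbrev_alt abbs words
instance (abbs : List String) (words : List String) (out : Bool) : Decidable (Spec_unique_abbrev abbs words out) := by unfold Spec_unique_abbrev; infer_instance

-- ===== CLAIM (what is proved, stated in full; the proofs are below) =====
def Claim_equal_unique_abbrev : Prop := ∀ (abbs : List String) (words : List String), Dom_unique_abbrev abbs words → Spec_unique_abbrev abbs words (unique_abbrev abbs words)

-- ===== LEMMAS AND PROOFS =====

-- the list of prefixes w[:i], i = 0 … len(w), that B's inner loop inserts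
def pfxs (w : String) : List String :=
  (List.range (w.toList.length + 1)).map (fun (i : Nat) => PySem.Str.slice w none (some ((i : Nat) : Int)))

lemma toList_pfx (w : String) (i : Nat) :
    (PySem.Str.slice w none (some (i : Int))).toList = w.toList.take i := by
  simp [PySem.Str.toList_slice, PySem.Chars.slice_eq_listSlice, PySem.List.slice_to_natCast]

lemma inner_eq (w : String) (d : PySem.Dict String Int) :
    (PySem.List.pyRange 0 (PySem.Str.len w + 1)).foldl
      (fun d i =>
        let p := PySem.Str.slice w none (some i)
        d.insert p (d.getD p 0 + 1)) d
    = (pfxs w).foldl (fun d p => d.insert p (d.getD p 0 + 1)) d := by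
  rw [PySem.List.pyRange_one]
  rw [List.foldl_map]
  unfold pfxs
  rw [List.foldl_map]
  have hlen : ((PySem.Str.len w + 1 - 0).toNat) = w.toList.length + 1 := by
    simp [PySem.Str.len_eq]
  rw [hlen]
  apply PySem.List.foldl_congr_mem
  intro acc a _
  simp

lemma mem_pfxs (w ab : String) :
    ab ∈ pfxs w ↔ PySem.Str.startswith w ab = true := by
  rw [PySem.Str.startswith_eq, PySem.Chars.startswith_iff]
  unfold pfxs
  constructor
  · intro h
    rcases List.mem_map.mp h with ⟨i, _, rfl⟩
    rw [List.prefix_iff_eq_take, toList_pfx]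
    simp
  · intro h
    refine List.mem_map.mpr ⟨ab.toList.length, ?_, ?_⟩
    · have := h.length_le
      simp only [List.mem_range]
      omega
    · apply String.toList_inj.mp
      rw [toList_pfx]
      exact (List.prefix_iff_eq_take.mp h).symm

lemma nodup_pfxs (w : String) : (pfxs w).Nodup := by
  unfold pfxs
  apply List.Nodup.map_on ?_ (List.nodup_range)
  intro i hi j hj hij
  have hi' : i ≤ w.toList.length := Nat.lt_succ_iff.mp (List.mem_range.mp hi)
  have hj' : j ≤ w.toList.length := Nat.lt_succ_iff.mp (List.mem_range.mp hj)
  have hlen := congrArg (fun s => s.toList.length) hij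
  simp only [toList_pfx, List.length_take] at hlen
  omega

lemma count_pfxs (w ab : String) :
    (pfxs w).count ab = if PySem.Str.startswith w ab then 1 else 0 := by
  by_cases h : PySem.Str.startswith w ab = true
  · rw [if_pos h]
    exact List.count_eq_one_of_mem (nodup_pfxs w) ((mem_pfxs w ab).mpr h)
  · rw [if_neg h]
    exact List.count_eq_zero_of_not_mem (fun hm => h ((mem_pfxs w ab).mp hm))

lemma cnt_getD (ws : List String) (d : PySem.Dict String Int) (ab : String) :
    (ws.foldl (fun d w => (pfxs w).foldl (fun d p => d.insert p (d.getD p 0 + 1)) d) d).getD ab 0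
    = d.getD ab 0 + ((ws.flatMap pfxs).count ab : Int) := by
  induction ws generalizing d with
  | nil => simp
  | cons w rest ih =>
    simp only [List.foldl_cons, List.flatMap_cons, List.count_append]
    rw [ih, PySem.Dict.getD_foldl_insert_add_one]
    push_cast
    ring

lemma flat_count (ws : List String) (ab : String) :
    (ws.flatMap pfxs).count ab = ws.countP (fun w => PySem.Str.startswith w ab) := by
  induction ws with
  | nil => simp
  | cons w rest ih =>
    simp only [List.flatMap_cons, List.count_append, List.countP_cons, ih, count_pfxs]
    by_cases h : PySem.Str.startswith w ab = true
    · simp only [h, if_pos]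
      omega
    · simp only [h, Bool.false_eq_true, ite_false]
      omega

lemma uaLoop_eq_all (words : List String) (abbs : List String) :
    uaLoop words abbs
    = abbs.all (fun ab => ((words.countP (fun w => PySem.Str.startswith w ab) : Int) ≤ 1 : Bool)) := by
  induction abbs with
  | nil => rfl
  | cons ab rest ih =>
    simp only [uaLoop, PySem.List.foldl_count_if, List.all_cons, ih, zero_add, gt_iff_lt]
    by_cases h : (1 : Int) < (words.countP (fun w => PySem.Str.startswith w ab) : Int)
    · rw [if_pos h, decide_eq_false (not_le.mpr h), Bool.false_and]
    · rw [if_neg h, decide_eq_true (not_lt.mp h), Bool.true_and]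

lemma alt_eq (abbs words : List String) :
    unique_abbrev_alt abbs words
    = abbs.all (fun ab => ((words.countP (fun w => PySem.Str.startswith w ab) : Int) ≤ 1 : Bool)) := by
  simp only [unique_abbrev_alt]
  rw [PySem.List.foldl_congr_mem words _
        (fun d w => (pfxs w).foldl (fun d p => d.insert p (d.getD p 0 + 1)) d)
        PySem.Dict.empty (fun acc w _ => inner_eq w acc)]
  refine List.all_congr rfl ?_
  intro ab
  rw [cnt_getD, flat_count]
  simp

-- ===== VERDICT (by name: the statement is the Claim_ definition above) =====
theorem unique_abbrev_spec : Claim_equal_unique_abbrev := by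
  intro abbs words _
  unfold Spec_unique_abbrev
  rw [alt_eq]
  exact uaLoop_eq_all words abbs
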